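-- pv_equiv track=rewrite | github.com/sajid50Buet/Bengali_ASR_App | utils.py | merge_transcriptions_lcs
-- ===== SOURCE A (Python) =====
-- def merge_transcriptions_lcs(transcriptions: list) -> str:
--     """
--     Merge overlapping transcriptions using Longest Common Subsequence (LCS)
--     algorithm at word level to remove duplicated text from overlap regions.
--     Based on NVIDIA's approach in parakeet_tdt.pdf
--     """
--     if not transcriptions:
--         return ""
--     if len(transcriptions) == 1:
--         return transcriptions[0]
--
--     def lcs_words(seq1: list, seq2: list) -> list:
--         """Find Longest Common Subsequence of two word lists"""
--         m, n = len(seq1), len(seq2)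
--
--         # Create DP table
--         dp = [[0] * (n + 1) for _ in range(m + 1)]
--
--         for i in range(1, m + 1):
--             for j in range(1, n + 1):
--                 if seq1[i-1] == seq2[j-1]:
--                     dp[i][j] = dp[i-1][j-1] + 1
--                 else:
--                     dp[i][j] = max(dp[i-1][j], dp[i][j-1])
--
--         # Backtrack to find LCS
--         lcs = []
--         i, j = m, n
--         while i > 0 and j > 0:
--             if seq1[i-1] == seq2[j-1]:
--                 lcs.append((i-1, j-1, seq1[i-1]))
--                 i -= 1
--                 j -= 1
--             elif dp[i-1][j] > dp[i][j-1]: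
--                 i -= 1
--             else:
--                 j -= 1
--
--         return list(reversed(lcs))
--
--     def find_overlap_point(prev_words: list, curr_words: list, max_overlap: int = 25) -> tuple:
--         """
--         Find the best overlap point between end of prev and start of curr
--         Returns (prev_end_idx, curr_start_idx)
--         """
--         # Look at last N words of prev and first N words of curr
--         check_prev = prev_words[-max_overlap:] if len(prev_words) > max_overlap else prev_words
--         check_curr = curr_words[:max_overlap] if len(curr_words) > max_overlap else curr_words
--
--         # Find LCS
--         lcs = lcs_words(check_prev, check_curr)
--
--         if len(lcs) >= 2:  # Need at least 2 matching words to be confident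
--             # Find the offset for prev_words if we sliced it
--             prev_offset = len(prev_words) - len(check_prev)
--
--             # Get the last match point
--             last_match = lcs[-1]
--             prev_idx = prev_offset + last_match[0]  # Index in original prev_words
--             curr_idx = last_match[1]  # Index in curr_words
--
--             return (prev_idx + 1, curr_idx + 1)  # +1 because we want to exclude the matched word from curr
--
--         return (len(prev_words), 0)  # No overlap found, just concatenate
--
--     # Merge all transcriptions
--     merged_words = transcriptions[0].split()
--
--     for i in range(1, len(transcriptions)):
--         curr_words = transcriptions[i].split()
--
--         if not curr_words:
--             continue
--
--         if not merged_words: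
--             merged_words = curr_words
--             continue
--
--         # Find overlap point
--         prev_end, curr_start = find_overlap_point(merged_words, curr_words)
--
--         # Merge: keep prev up to overlap, then add curr from overlap
--         merged_words = merged_words[:prev_end] + curr_words[curr_start:]
--
--     return " ".join(merged_words)
-- ===== SOURCE B (Python) =====
-- def merge_transcriptions_lcs(transcriptions: list) -> str:
--     """
--     Merge overlapping transcriptions, removing duplicated overlap text.
--     Same result as the DP-table version, but the LCS length is computed by a
--     top-down memoized recursion and the common subsequence is reconstructed by
--     walking back from (m, n) querying that length function.
--     """
--     if not transcriptions:
--         return ""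
--     if len(transcriptions) == 1:
--         return transcriptions[0]
--
--     def make_lcs_len(seq1: list, seq2: list):
--         memo = {}
--
--         def lcs_len(i: int, j: int) -> int:
--             if i == 0 or j == 0:
--                 return 0
--             key = (i, j)
--             if key in memo:
--                 return memo[key]
--             if seq1[i - 1] == seq2[j - 1]:
--                 v = lcs_len(i - 1, j - 1) + 1
--             else:
--                 v = max(lcs_len(i - 1, j), lcs_len(i, j - 1))
--             memo[key] = v
--             return v
--
--         return lcs_len
--
--     def lcs_words(seq1: list, seq2: list) -> list:
--         """Reconstruct the LCS by walking back from (m, n) via the length function."""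
--         L = make_lcs_len(seq1, seq2)
--         out = []
--         i, j = len(seq1), len(seq2)
--         while i > 0 and j > 0:
--             if seq1[i - 1] == seq2[j - 1]:
--                 out.append((i - 1, j - 1, seq1[i - 1]))
--                 i -= 1
--                 j -= 1
--             elif L(i - 1, j) > L(i, j - 1):
--                 i -= 1
--             else:
--                 j -= 1
--         out.reverse()
--         return out
--
--     def find_overlap_point(prev_words: list, curr_words: list, max_overlap: int = 25) -> tuple:
--         check_prev = prev_words[-max_overlap:]
--         check_curr = curr_words[:max_overlap]
--         lcs = lcs_words(check_prev, check_curr)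
--         if len(lcs) < 2:
--             return (len(prev_words), 0)
--         prev_offset = len(prev_words) - len(check_prev)
--         pi, ci, _ = lcs[-1]
--         return (prev_offset + pi + 1, ci + 1)
--
--     merged_words = transcriptions[0].split()
--     for chunk in transcriptions[1:]:
--         curr_words = chunk.split()
--         if not curr_words:
--             continue
--         if not merged_words:
--             merged_words = curr_words
--             continue
--         prev_end, curr_start = find_overlap_point(merged_words, curr_words)
--         merged_words = merged_words[:prev_end] + curr_words[curr_start:]
--     return " ".join(merged_words)
-- ===== Notes on version B (the rewrite author's own statement) =====
-- stated objective: alternative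
-- what changed: The bottom-up (m+1)x(n+1) LCS DP table and table-backtracking are replaced by a top-down memoized recursive length function lcs_len(i,j) plus a reconstruction walk that queries it with the same diagonal/decrement tie-break rule; the merge loop iterates over transcriptions[1:] directly instead of indexing, and the max_overlap windows use unconditional slices.
import Mathlib
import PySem

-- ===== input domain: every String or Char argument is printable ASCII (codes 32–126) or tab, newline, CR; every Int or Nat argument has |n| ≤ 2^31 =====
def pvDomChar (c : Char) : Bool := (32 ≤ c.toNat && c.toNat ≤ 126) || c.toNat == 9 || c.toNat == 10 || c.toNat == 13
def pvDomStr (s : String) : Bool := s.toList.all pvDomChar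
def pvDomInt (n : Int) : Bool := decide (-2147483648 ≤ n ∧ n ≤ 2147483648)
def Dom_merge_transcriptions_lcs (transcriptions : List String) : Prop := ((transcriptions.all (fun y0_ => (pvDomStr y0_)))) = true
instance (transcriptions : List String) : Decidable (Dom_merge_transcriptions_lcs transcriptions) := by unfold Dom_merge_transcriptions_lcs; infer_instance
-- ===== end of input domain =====

-- B replaces A's bottom-up LCS DP table + table backtracking by a top-down memoized length
-- function and a reconstruction walk querying it (same tie-break), and iterates over
-- transcriptions[1:] directly; an alternative decomposition, not claimed faster.

-- ===== PORT A =====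
-- All dp/seq indices below are in range in A (i ∈ 1..m, j ∈ 1..n over an (m+1)×(n+1) table),
-- so List.getD / List.set are exact for Python's dp[i][j] reads/writes. dp values are
-- nonnegative Python ints, carried as Nat.
def aStep (s1 s2 : List String) (dp : List (List Nat)) (i j : Nat) : List (List Nat) :=
  let v := if s1.getD (i-1) "" = s2.getD (j-1) "" then ((dp.getD (i-1) []).getD (j-1) 0) + 1
           else max ((dp.getD (i-1) []).getD j 0) ((dp.getD i []).getD (j-1) 0)
  dp.set i ((dp.getD i []).set j v)

-- 'for j in range(1, n + 1)'
def aRow (s1 s2 : List String) (dp : List (List Nat)) (i : Nat) : List (List Nat) :=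
  (List.range' 1 s2.length).foldl (fun dp j => aStep s1 s2 dp i j) dp

-- 'dp = [[0] * (n + 1) for _ in range(m + 1)]' then 'for i in range(1, m + 1)'
def aDpFill (s1 s2 : List String) : List (List Nat) :=
  (List.range' 1 s1.length).foldl (fun dp i => aRow s1 s2 dp i)
    (List.replicate (s1.length + 1) (List.replicate (s2.length + 1) 0))

-- the 'while i > 0 and j > 0' backtracking loop ('lcs.append' = acc ++ [·])
def aBacktrack (s1 s2 : List String) (dp : List (List Nat)) :
    Nat → Nat → List (Nat × Nat × String) → List (Nat × Nat × String)
  | 0, _, acc => acc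
  | _+1, 0, acc => acc
  | i+1, j+1, acc =>
    if s1.getD i "" = s2.getD j "" then
      aBacktrack s1 s2 dp i j (acc ++ [(i, j, s1.getD i "")])
    else if (dp.getD i []).getD (j+1) 0 > (dp.getD (i+1) []).getD j 0 then
      aBacktrack s1 s2 dp i (j+1) acc
    else
      aBacktrack s1 s2 dp (i+1) j acc
  termination_by i j _ => (i, j)

-- lcs_words: fill the table, backtrack, 'return list(reversed(lcs))'
def aLcsWords (s1 s2 : List String) : List (Nat × Nat × String) :=
  (aBacktrack s1 s2 (aDpFill s1 s2) s1.length s2.length []).reverse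

-- find_overlap_point (max_overlap = 25); lcs[-1] is in range since len(lcs) ≥ 2, so getLastD is exact
def aFindOverlap (prev curr : List String) : Nat × Nat :=
  let check_prev := if prev.length > 25 then PySem.List.slice prev (some (-25)) none else prev
  let check_curr := if curr.length > 25 then PySem.List.slice curr none (some 25) else curr
  let lcs := aLcsWords check_prev check_curr
  if lcs.length ≥ 2 then
    let prev_offset := prev.length - check_prev.length
    let last_match := lcs.getLastD (0, 0, "")
    (prev_offset + last_match.1 + 1, last_match.2.1 + 1)
  else
    (prev.length, 0)

def merge_transcriptions_lcs (transcriptions : List String) : String :=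
  if transcriptions = [] then ""
  else if transcriptions.length = 1 then transcriptions.getD 0 ""
  else
    let merged0 := PySem.Str.split₀ (transcriptions.getD 0 "")
    let merged := (List.range' 1 (transcriptions.length - 1)).foldl (fun merged i =>
      let curr := PySem.Str.split₀ (transcriptions.getD i "")
      if curr = [] then merged
      else if merged = [] then curr
      else
        let pc := aFindOverlap merged curr
        PySem.List.slice merged none (some (pc.1 : Int)) ++
          PySem.List.slice curr (some (pc.2 : Int)) none) merged0
    PySem.Str.join " " merged

-- ===== PORT B =====
-- memoized lcs_len(i, j): the memo dict is threaded through the recursion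
def bLcsLen (s1 s2 : List String) :
    Nat → Nat → PySem.Dict (Nat × Nat) Nat → Nat × PySem.Dict (Nat × Nat) Nat
  | 0, _, memo => (0, memo)
  | _+1, 0, memo => (0, memo)
  | i+1, j+1, memo =>
    match PySem.Dict.get? memo (i+1, j+1) with
    | some v => (v, memo)
    | none =>
      let r :=
        if s1.getD i "" = s2.getD j "" then
          let p := bLcsLen s1 s2 i j memo
          (p.1 + 1, p.2)
        else
          let p := bLcsLen s1 s2 i (j+1) memo
          let q := bLcsLen s1 s2 (i+1) j p.2
          (max p.1 q.1, q.2)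
      (r.1, PySem.Dict.insert r.2 (i+1, j+1) r.1)
  termination_by i j _ => (i, j)

-- the 'while i > 0 and j > 0' reconstruction walk of Source B, querying lcs_len
def bWalk (s1 s2 : List String) :
    Nat → Nat → PySem.Dict (Nat × Nat) Nat → List (Nat × Nat × String) →
    List (Nat × Nat × String) × PySem.Dict (Nat × Nat) Nat
  | 0, _, memo, acc => (acc, memo)
  | _+1, 0, memo, acc => (acc, memo)
  | i+1, j+1, memo, acc =>
    if s1.getD i "" = s2.getD j "" then
      bWalk s1 s2 i j memo (acc ++ [(i, j, s1.getD i "")])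
    else
      let p := bLcsLen s1 s2 i (j+1) memo
      let q := bLcsLen s1 s2 (i+1) j p.2
      if p.1 > q.1 then bWalk s1 s2 i (j+1) q.2 acc
      else bWalk s1 s2 (i+1) j q.2 acc
  termination_by i j _ _ => (i, j)

def bLcsWords (s1 s2 : List String) : List (Nat × Nat × String) :=
  ((bWalk s1 s2 s1.length s2.length PySem.Dict.empty []).1).reverse

def bFindOverlap (prev curr : List String) : Nat × Nat :=
  let check_prev := PySem.List.slice prev (some (-25)) none
  let check_curr := PySem.List.slice curr none (some 25)
  let lcs := bLcsWords check_prev check_curr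
  if lcs.length < 2 then (prev.length, 0)
  else
    let prev_offset := prev.length - check_prev.length
    let last := lcs.getLastD (0, 0, "")
    (prev_offset + last.1 + 1, last.2.1 + 1)

-- merged[:prev_end] / curr[curr_start:] with nonnegative bounds are take/drop
-- (PySem.List.slice_to_natCast / slice_from_natCast)
def merge_transcriptions_lcs_alt (transcriptions : List String) : String :=
  if transcriptions = [] then ""
  else if transcriptions.length = 1 then transcriptions.getD 0 ""
  else
    let merged := (transcriptions.drop 1).foldl (fun merged chunk =>
      let curr := PySem.Str.split₀ chunk
      if curr = [] then merged
      else if merged = [] then curr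
      else
        let pc := bFindOverlap merged curr
        merged.take pc.1 ++ curr.drop pc.2) (PySem.Str.split₀ (transcriptions.getD 0 ""))
    PySem.Str.join " " merged

-- ===== PRECONDITION & SPEC =====
def Spec_merge_transcriptions_lcs (transcriptions : List String) (out : String) : Prop := out = merge_transcriptions_lcs_alt transcriptions
instance (transcriptions : List String) (out : String) : Decidable (Spec_merge_transcriptions_lcs transcriptions out) := by unfold Spec_merge_transcriptions_lcs; infer_instance

-- ===== CLAIM (what is proved, stated in full; the proofs are below) =====
def Claim_equal_merge_transcriptions_lcs : Prop := ∀ (transcriptions : List String), Dom_merge_transcriptions_lcs transcriptions → Spec_merge_transcriptions_lcs transcriptions (merge_transcriptions_lcs transcriptions)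

-- ===== LEMMAS AND PROOFS =====

-- reference LCS length (the value dp[i][j] of A and lcs_len(i, j) of B)
def lcsN (s1 s2 : List String) : Nat → Nat → Nat
  | 0, _ => 0
  | _+1, 0 => 0
  | i+1, j+1 =>
    if s1.getD i "" = s2.getD j "" then lcsN s1 s2 i j + 1
    else max (lcsN s1 s2 i (j+1)) (lcsN s1 s2 (i+1) j)
  termination_by i j => (i, j)

-- reference backtracking walk, phrased directly over lcsN
def idealBT (s1 s2 : List String) :
    Nat → Nat → List (Nat × Nat × String) → List (Nat × Nat × String)
  | 0, _, acc => acc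
  | _+1, 0, acc => acc
  | i+1, j+1, acc =>
    if s1.getD i "" = s2.getD j "" then idealBT s1 s2 i j (acc ++ [(i, j, s1.getD i "")])
    else if lcsN s1 s2 i (j+1) > lcsN s1 s2 (i+1) j then idealBT s1 s2 i (j+1) acc
    else idealBT s1 s2 (i+1) j acc
  termination_by i j _ => (i, j)

lemma lcsN_zero_right (s1 s2 : List String) (a : Nat) : lcsN s1 s2 a 0 = 0 := by
  cases a <;> simp [lcsN]

lemma lcsN_succ (s1 s2 : List String) (i j : Nat) :
    lcsN s1 s2 (i+1) (j+1) = if s1.getD i "" = s2.getD j "" then lcsN s1 s2 i j + 1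
      else max (lcsN s1 s2 i (j+1)) (lcsN s1 s2 (i+1) j) := by
  rw [lcsN]


def MemoOK (s1 s2 : List String) (memo : PySem.Dict (Nat × Nat) Nat) : Prop :=
  ∀ k v, PySem.Dict.get? memo k = some v → v = lcsN s1 s2 k.1 k.2

lemma memoOK_insert (s1 s2 : List String) (memo : PySem.Dict (Nat × Nat) Nat) (a b v : Nat)
    (hm : MemoOK s1 s2 memo) (hv : v = lcsN s1 s2 a b) :
    MemoOK s1 s2 (PySem.Dict.insert memo (a, b) v) := by
  intro k w hk
  rw [PySem.Dict.get?_insert] at hk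
  split at hk
  · next hkk => cases hk; subst hkk; exact hv
  · exact hm k w hk

lemma bLcsLen_ok (s1 s2 : List String) :
    ∀ (i j : Nat) (memo : PySem.Dict (Nat × Nat) Nat), MemoOK s1 s2 memo →
      (bLcsLen s1 s2 i j memo).1 = lcsN s1 s2 i j ∧ MemoOK s1 s2 (bLcsLen s1 s2 i j memo).2 := by
  intro i j memo
  fun_induction bLcsLen s1 s2 i j memo with
  | case1 => intro h; simp [lcsN]; exact h
  | case2 => intro h; simp [lcsN]; exact h
  | case3 i j memo v hget =>
    intro h
    simp only
    exact ⟨(h _ _ hget).symm ▸ (h _ _ hget), h⟩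
  | case4 i j memo hget r ih3 ih2 ih1 =>
    intro h
    simp only [r]
    split_ifs with hw
    · obtain ⟨hv, hm⟩ := ih3 h
      constructor
      · simp only [Nat.succ_eq_add_one, lcsN_succ, if_pos hw, hv]
      · exact memoOK_insert _ _ _ _ _ _ hm (by rw [lcsN_succ, if_pos hw, hv])
    · obtain ⟨hv1, hm1⟩ := ih2 h
      obtain ⟨hv2, hm2⟩ := ih1 hm1
      constructor
      · simp only [Nat.succ_eq_add_one, lcsN_succ, if_neg hw, hv1, hv2]
      · exact memoOK_insert _ _ _ _ _ _ hm2 (by rw [lcsN_succ, if_neg hw, hv1, hv2])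

lemma bWalk_eq (s1 s2 : List String) :
    ∀ (i j : Nat) (memo : PySem.Dict (Nat × Nat) Nat) (acc : List (Nat × Nat × String)),
      MemoOK s1 s2 memo → (bWalk s1 s2 i j memo acc).1 = idealBT s1 s2 i j acc := by
  intro i j memo acc
  fun_induction bWalk s1 s2 i j memo acc with
  | case1 => intro h; simp [idealBT]
  | case2 => intro h; simp [idealBT]
  | case3 i j memo acc hw ih =>
    intro h
    rw [idealBT, if_pos hw]
    exact ih h
  | case4 i j memo acc hw p q hgt ih =>
    intro h
    obtain ⟨hv1, hm1⟩ := bLcsLen_ok s1 s2 i (j+1) memo h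
    obtain ⟨hv2, hm2⟩ := bLcsLen_ok s1 s2 (i+1) j _ hm1
    rw [idealBT, if_neg hw, if_pos (by rw [← hv1, ← hv2]; exact hgt)]
    exact ih hm2
  | case5 i j memo acc hw p q hgt ih =>
    intro h
    obtain ⟨hv1, hm1⟩ := bLcsLen_ok s1 s2 i (j+1) memo h
    obtain ⟨hv2, hm2⟩ := bLcsLen_ok s1 s2 (i+1) j _ hm1
    rw [idealBT, if_neg hw, if_neg (by rw [← hv1, ← hv2]; exact hgt)]
    exact ih hm2

def g2 (dp : List (List Nat)) (a b : Nat) : Nat := (dp.getD a []).getD b 0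

def DpInv (s1 s2 : List String) (i j : Nat) (dp : List (List Nat)) : Prop :=
  dp.length = s1.length + 1 ∧
  (∀ a, a ≤ s1.length → (dp.getD a []).length = s2.length + 1) ∧
  (∀ a b, a ≤ s1.length → b ≤ s2.length →
    g2 dp a b = if a < i ∨ (a = i ∧ b ≤ j) then lcsN s1 s2 a b else 0)

lemma getD_set_eq {α : Type} (l : List α) (i a : Nat) (v d : α) (h : i < l.length) :
    (l.set i v).getD a d = if a = i then v else l.getD a d := by
  rcases eq_or_ne a i with rfl | hne
  · simp [List.getD_eq_getElem?_getD, h]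
  · simp [List.getD_eq_getElem?_getD, List.getElem?_set_ne (Ne.symm hne), hne]

lemma aStep_inv (s1 s2 : List String) (dp : List (List Nat)) (i j : Nat)
    (hi1 : 1 ≤ i) (hi : i ≤ s1.length) (hj : j < s2.length)
    (h : DpInv s1 s2 i j dp) : DpInv s1 s2 i (j+1) (aStep s1 s2 dp i (j+1)) := by
  obtain ⟨hlen, hrow, hval⟩ := h
  have hidp : i < dp.length := by omega
  have hrowi : (dp.getD i []).length = s2.length + 1 := hrow i hi
  obtain ⟨i', rfl⟩ : ∃ i', i = i' + 1 := ⟨i - 1, by omega⟩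
  -- the written value is lcsN s1 s2 (i'+1) (j+1)
  have hv : (if s1.getD ((i'+1)-1) "" = s2.getD ((j+1)-1) "" then ((dp.getD ((i'+1)-1) []).getD ((j+1)-1) 0) + 1
      else max ((dp.getD ((i'+1)-1) []).getD (j+1) 0) ((dp.getD (i'+1) []).getD ((j+1)-1) 0))
      = lcsN s1 s2 (i'+1) (j+1) := by
    have e1 : g2 dp i' j = lcsN s1 s2 i' j := by
      rw [hval i' j (by omega) (by omega)]; simp
    have e2 : g2 dp i' (j+1) = lcsN s1 s2 i' (j+1) := by
      rw [hval i' (j+1) (by omega) (by omega)]; simp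
    have e3 : g2 dp (i'+1) j = lcsN s1 s2 (i'+1) j := by
      rw [hval (i'+1) j (by omega) (by omega)]; simp
    simp only [Nat.add_sub_cancel] at *
    rw [lcsN_succ]
    unfold g2 at e1 e2 e3
    rw [e1, e2, e3]
  have hstep : aStep s1 s2 dp (i'+1) (j+1)
      = dp.set (i'+1) ((dp.getD (i'+1) []).set (j+1) (lcsN s1 s2 (i'+1) (j+1))) := by
    simp only [aStep]
    rw [hv]
  rw [hstep]
  refine ⟨?_, ?_, ?_⟩
  · simp [hlen]
  · intro a ha
    rw [getD_set_eq _ _ _ _ _ hidp]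
    by_cases hai : a = i' + 1
    · rw [if_pos hai, List.length_set]; exact hrowi
    · rw [if_neg hai]; exact hrow a ha
  · intro a b ha hb
    unfold g2
    rw [getD_set_eq _ _ _ _ _ hidp]
    by_cases hai : a = i' + 1
    · subst hai
      rw [if_pos rfl, getD_set_eq _ _ _ _ _ (show j+1 < _ by rw [hrowi]; omega)]
      by_cases hbj : b = j + 1
      · subst hbj
        rw [if_pos rfl, if_pos (by omega)]
      · rw [if_neg hbj]
        have hh := hval (i'+1) b (by omega) hb
        unfold g2 at hh
        rw [hh]
        by_cases hble : b ≤ j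
        · rw [if_pos (by omega), if_pos (by omega)]
        · rw [if_neg (by omega), if_neg (by omega)]
    · rw [if_neg hai]
      have hh := hval a b ha hb
      unfold g2 at hh
      rw [hh]
      by_cases hlt : a < i' + 1
      · rw [if_pos (by omega), if_pos (by omega)]
      · rw [if_neg (by omega), if_neg (by omega)]

lemma getD_replicate {α : Type} (n a : Nat) (x d : α) (h : a < n) :
    (List.replicate n x).getD a d = x := by
  rw [List.getD_eq_getElem?_getD, List.getElem?_replicate, if_pos h]
  rfl

lemma dpInv_next_row (s1 s2 : List String) (i : Nat) (dp : List (List Nat))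
    (h : DpInv s1 s2 i s2.length dp) : DpInv s1 s2 (i+1) 0 dp := by
  obtain ⟨hlen, hrow, hval⟩ := h
  refine ⟨hlen, hrow, ?_⟩
  intro a b ha hb
  rw [hval a b ha hb]
  by_cases h1 : a ≤ i
  · rw [if_pos (by omega), if_pos (by omega)]
  · by_cases h2 : a = i + 1 ∧ b ≤ 0
    · rw [if_neg (by omega), if_pos (by omega)]
      obtain ⟨rfl, hb0⟩ := h2
      have : b = 0 := by omega
      subst this
      exact (lcsN_zero_right s1 s2 _).symm
    · rw [if_neg (by omega), if_neg (by intro hc; cases hc with | inl h => omega | inr h => exact h2 h)]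

lemma aRow_inv (s1 s2 : List String) (i : Nat) (dp : List (List Nat))
    (hi1 : 1 ≤ i) (hi : i ≤ s1.length) (h : DpInv s1 s2 i 0 dp) :
    DpInv s1 s2 i s2.length (aRow s1 s2 dp i) := by
  have key : ∀ k, k ≤ s2.length →
      DpInv s1 s2 i k ((List.range' 1 k).foldl (fun dp j => aStep s1 s2 dp i j) dp) := by
    intro k
    induction k with
    | zero => intro _; simpa using h
    | succ k ih =>
      intro hk
      rw [List.range'_1_concat, List.foldl_append, List.foldl_cons, List.foldl_nil,
        Nat.add_comm 1 k]
      exact aStep_inv s1 s2 _ i k hi1 hi (by omega) (ih (by omega))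
  exact key s2.length (le_refl _)

lemma aDpFill_inv (s1 s2 : List String) :
    DpInv s1 s2 s1.length s2.length (aDpFill s1 s2) := by
  have base : DpInv s1 s2 0 s2.length
      (List.replicate (s1.length + 1) (List.replicate (s2.length + 1) 0)) := by
    refine ⟨by simp, ?_, ?_⟩
    · intro a ha
      rw [getD_replicate _ _ _ _ (by omega)]
      simp
    · intro a b ha hb
      unfold g2
      rw [getD_replicate _ _ _ _ (by omega), getD_replicate _ _ _ _ (by omega)]
      by_cases h0 : a = 0
      · subst h0
        rw [if_pos (by omega)]
        cases b <;> simp [lcsN]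
      · rw [if_neg (by omega)]
  have key : ∀ k, k ≤ s1.length →
      DpInv s1 s2 k s2.length ((List.range' 1 k).foldl (fun dp i => aRow s1 s2 dp i)
        (List.replicate (s1.length + 1) (List.replicate (s2.length + 1) 0))) := by
    intro k
    induction k with
    | zero => intro _; simpa using base
    | succ k ih =>
      intro hk
      rw [List.range'_1_concat, List.foldl_append, List.foldl_cons, List.foldl_nil,
        Nat.add_comm 1 k]
      exact aRow_inv s1 s2 (k+1) _ (by omega) (by omega)
        (dpInv_next_row s1 s2 k _ (ih (by omega)))
  exact key s1.length (le_refl _)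

lemma g2_fill (s1 s2 : List String) (a b : Nat) (ha : a ≤ s1.length) (hb : b ≤ s2.length) :
    g2 (aDpFill s1 s2) a b = lcsN s1 s2 a b := by
  obtain ⟨hlen, hrow, hval⟩ := aDpFill_inv s1 s2
  rw [hval a b ha hb, if_pos (by omega)]

lemma aBacktrack_eq (s1 s2 : List String) :
    ∀ (i j : Nat) (acc : List (Nat × Nat × String)), i ≤ s1.length → j ≤ s2.length →
      aBacktrack s1 s2 (aDpFill s1 s2) i j acc = idealBT s1 s2 i j acc := by
  intro i j acc
  fun_induction idealBT s1 s2 i j acc with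
  | case1 => intro _ _; simp [aBacktrack]
  | case2 => intro _ _; simp [aBacktrack]
  | case3 i j acc hw ih =>
    intro hi hj
    rw [aBacktrack, if_pos hw]
    exact ih (by omega) (by omega)
  | case4 i j acc hw hgt ih =>
    intro hi hj
    have e1 : (aDpFill s1 s2).getD i [] = (aDpFill s1 s2).getD i [] := rfl
    have g1 : g2 (aDpFill s1 s2) i (j+1) = lcsN s1 s2 i (j+1) :=
      g2_fill s1 s2 i (j+1) (by omega) (by omega)
    have g3 : g2 (aDpFill s1 s2) (i+1) j = lcsN s1 s2 (i+1) j :=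
      g2_fill s1 s2 (i+1) j (by omega) (by omega)
    unfold g2 at g1 g3
    rw [aBacktrack, if_neg hw, if_pos (by rw [g1, g3]; exact hgt)]
    exact ih (by omega) (by omega)
  | case5 i j acc hw hgt ih =>
    intro hi hj
    have g1 : g2 (aDpFill s1 s2) i (j+1) = lcsN s1 s2 i (j+1) :=
      g2_fill s1 s2 i (j+1) (by omega) (by omega)
    have g3 : g2 (aDpFill s1 s2) (i+1) j = lcsN s1 s2 (i+1) j :=
      g2_fill s1 s2 (i+1) j (by omega) (by omega)
    unfold g2 at g1 g3
    rw [aBacktrack, if_neg hw, if_neg (by rw [g1, g3]; exact hgt)]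
    exact ih (by omega) (by omega)

lemma memoOK_empty (s1 s2 : List String) : MemoOK s1 s2 PySem.Dict.empty := by
  intro k v h
  rw [PySem.Dict.get?_empty] at h
  cases h

lemma lcsWords_eq (s1 s2 : List String) : aLcsWords s1 s2 = bLcsWords s1 s2 := by
  rw [aLcsWords, bLcsWords,
    aBacktrack_eq s1 s2 s1.length s2.length [] (le_refl _) (le_refl _),
    bWalk_eq s1 s2 s1.length s2.length PySem.Dict.empty [] (memoOK_empty s1 s2)]

lemma findOverlap_eq (prev curr : List String) :
    aFindOverlap prev curr = bFindOverlap prev curr := by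
  have hp : (if prev.length > 25 then PySem.List.slice prev (some (-25)) none else prev)
      = PySem.List.slice prev (some (-25)) none := by
    split_ifs with h
    · rfl
    · rw [PySem.List.slice_from_neg_ofNat prev 25 (by omega),
        show prev.length - 25 = 0 by omega]
      simp
  have hc : (if curr.length > 25 then PySem.List.slice curr none (some 25) else curr)
      = PySem.List.slice curr none (some 25) := by
    split_ifs with h
    · rfl
    · rw [PySem.List.slice_to (xs := curr) (b := 25) (by norm_num)]
      exact (List.take_of_length_le (by omega)).symm
  simp only [aFindOverlap, bFindOverlap, hp, hc, lcsWords_eq]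
  by_cases h2 : (bLcsWords (PySem.List.slice prev (some (-25)) none)
      (PySem.List.slice curr none (some 25))).length < 2
  · rw [if_neg (by omega), if_pos h2]
  · rw [if_pos (by omega), if_neg h2]

lemma foldl_getD_range' (f : List String → String → List String) :
    ∀ (suf pre init : List String),
      (List.range' pre.length suf.length).foldl (fun m i => f m ((pre ++ suf).getD i "")) init
        = suf.foldl f init := by
  intro suf
  induction suf with
  | nil => intro pre init; simp
  | cons x suf ih =>
    intro pre init
    rw [List.length_cons, List.range'_succ, List.foldl_cons]
    have h1 : (pre ++ x :: suf).getD pre.length "" = x := by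
      rw [List.getD_eq_getElem?_getD, List.getElem?_append_right (le_refl _)]
      simp
    rw [h1, List.foldl_cons]
    have h2 := ih (pre ++ [x]) (f init x)
    simp only [List.length_append, List.length_cons, List.length_nil, List.append_assoc,
      List.singleton_append] at h2
    simpa using h2

-- ===== VERDICT (by name: the statement is the Claim_ definition above) =====
theorem merge_transcriptions_lcs_spec : Claim_equal_merge_transcriptions_lcs := by
  unfold Claim_equal_merge_transcriptions_lcs
  intro ts _
  unfold Spec_merge_transcriptions_lcs merge_transcriptions_lcs merge_transcriptions_lcs_alt
  by_cases h0 : ts = []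
  · rw [if_pos h0, if_pos h0]
  · rw [if_neg h0, if_neg h0]
    by_cases h1 : ts.length = 1
    · rw [if_pos h1, if_pos h1]
    · rw [if_neg h1, if_neg h1]
      obtain ⟨t0, rest, rfl⟩ : ∃ t0 rest, ts = t0 :: rest := by
        cases ts with
        | nil => exact absurd rfl h0
        | cons a l => exact ⟨a, l, rfl⟩
      simp only
      congr 1
      have hfun : (fun (merged : List String) (i : Nat) =>
          let curr := PySem.Str.split₀ ((t0 :: rest).getD i "")
          if curr = [] then merged
          else if merged = [] then curr
          else
            let pc := aFindOverlap merged curr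
            PySem.List.slice merged none (some (pc.1 : Int)) ++
              PySem.List.slice curr (some (pc.2 : Int)) none)
          = (fun (merged : List String) (i : Nat) =>
              (fun (m : List String) (c : String) =>
                let curr := PySem.Str.split₀ c
                if curr = [] then m
                else if m = [] then curr
                else
                  let pc := bFindOverlap m curr
                  m.take pc.1 ++ curr.drop pc.2) merged ((t0 :: rest).getD i "")) := by
        funext m i
        simp only
        split_ifs with hcu hme
        · rfl
        · rfl
        · rw [findOverlap_eq, PySem.List.slice_to_natCast, PySem.List.slice_from_natCast]
      rw [hfun]
      have hlen : (t0 :: rest).length - 1 = rest.length := by simp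
      rw [hlen]
      have happ := foldl_getD_range'
        (fun m c =>
          let curr := PySem.Str.split₀ c
          if curr = [] then m
          else if m = [] then curr
          else
            let pc := bFindOverlap m curr
            m.take pc.1 ++ curr.drop pc.2)
        rest [t0] (PySem.Str.split₀ ((t0 :: rest).getD 0 ""))
      simp only [List.length_cons, List.length_nil, List.singleton_append] at happ
      rw [happ]
      simp
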